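-- pv_equiv track=rewrite | github.com/hheinzer/aoc2023 | 14.py | find_padding_period
-- ===== SOURCE A (Python) =====
-- def find_padding_period(sequence):
--     n = len(sequence)
--     for i in range(0, n):
--         padding = sequence[:i]
--         for j in range(i + 1, n + 1):
--             period = sequence[i:j]
--             if len(period) <= n - len(padding) - len(period):
--                 is_period = True
--                 for k in range(j, n - ((n - len(padding)) % len(period)), len(period)):
--                     is_period &= sequence[k : k + len(period)] == period
--                 if is_period:
--                     return padding, period
-- ===== SOURCE B (Python) =====
-- def find_padding_period(sequence):
--     n = len(sequence)
--     # lcp[i][j] = length of the longest common prefix of sequence[i:] and sequence[j:],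
--     # built once by dynamic programming (back to front).
--     lcp = [[0] * (n + 1) for _ in range(n + 1)]
--     for i in range(n - 1, -1, -1):
--         for j in range(n - 1, -1, -1):
--             if sequence[i] == sequence[j]:
--                 lcp[i][j] = lcp[i + 1][j + 1] + 1
--     for i in range(n):
--         m = n - i
--         for L in range(1, m // 2 + 1):
--             # the q = m // L blocks of length L starting at i all agree
--             # iff the suffixes at i and i + L share a prefix of q*L - L elements
--             if lcp[i][i + L] >= (m // L) * L - L:
--                 return sequence[:i], sequence[i:i + L]
--     return None
-- ===== Notes on version B (the rewrite author's own statement) =====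
-- stated objective: faster
-- what changed: B precomputes an (n+1)x(n+1) longest-common-prefix-of-suffixes table by dynamic programming once, and each candidate (padding i, period length L) is then decided by the single table lookup lcp[i][i+L] >= (m//L)*L - L, eliminating A's inner block-by-block verification loop entirely.
import Mathlib
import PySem

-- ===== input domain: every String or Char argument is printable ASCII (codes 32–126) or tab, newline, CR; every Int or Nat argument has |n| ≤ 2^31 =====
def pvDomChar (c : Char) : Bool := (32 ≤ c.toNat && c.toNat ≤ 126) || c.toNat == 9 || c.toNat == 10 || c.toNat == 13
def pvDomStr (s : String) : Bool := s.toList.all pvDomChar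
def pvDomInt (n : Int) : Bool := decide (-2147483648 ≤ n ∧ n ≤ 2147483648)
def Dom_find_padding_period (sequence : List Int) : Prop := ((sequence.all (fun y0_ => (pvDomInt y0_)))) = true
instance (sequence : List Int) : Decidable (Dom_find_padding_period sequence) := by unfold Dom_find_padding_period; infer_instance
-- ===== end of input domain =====

-- B replaces A's cubic scan-and-verify by a quadratic dynamic program: a table of
-- longest-common-prefix lengths of all suffix pairs is built once, and each
-- candidate (padding, period-length) is decided by a single table lookup.

-- ===== PORT A =====
def find_padding_period (sequence : List Int) : Option (List Int × List Int) :=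
  let n : Int := PySem.List.len sequence
  (PySem.List.pyRange 0 n 1).findSome? (fun i =>
    let padding := PySem.List.slice sequence (some 0) (some i)
    (PySem.List.pyRange (i + 1) (n + 1) 1).findSome? (fun j =>
      let period := PySem.List.slice sequence (some i) (some j)
      if PySem.List.len period ≤ n - PySem.List.len padding - PySem.List.len period then
        let is_period := (PySem.List.pyRange j
            (n - PySem.Int.mod (n - PySem.List.len padding) (PySem.List.len period))
            (PySem.List.len period)).foldl
          (fun acc k => acc &&
            (PySem.List.slice sequence (some k) (some (k + PySem.List.len period)) == period)) true
        if is_period then some (padding, period) else none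
      else none))

-- ===== PORT B =====
-- row i of the LCP table, computed from row i+1 (entry j compares sequence[i] with sequence[j])
def pvLcpRow (seq : List Int) (i : Nat) (next : List Nat) : List Nat :=
  ((List.range seq.length).map (fun j =>
    if seq.getD i 0 = seq.getD j 0 then next.getD (j + 1) 0 + 1 else 0)) ++ [0]

-- rows (n-k) … n of the LCP table, last row (all zeros) innermost; built back to front
def pvLcpRows (seq : List Int) : Nat → List (List Nat)
  | 0 => [List.replicate (seq.length + 1) 0]
  | k + 1 => pvLcpRow seq (seq.length - (k + 1)) ((pvLcpRows seq k).headD []) :: pvLcpRows seq k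

def find_padding_period_alt (sequence : List Int) : Option (List Int × List Int) :=
  let n := sequence.length
  let lcp := pvLcpRows sequence n
  (List.range n).findSome? (fun i =>
    let m := n - i
    (List.range (m / 2)).findSome? (fun k =>
      let L := k + 1
      if (m / L) * L - L ≤ (lcp.getD i []).getD (i + L) 0 then
        some (sequence.take i, (sequence.drop i).take L)
      else none))

-- ===== PRECONDITION & SPEC =====
def Spec_find_padding_period (sequence : List Int) (out : Option (List Int × List Int)) : Prop := out = find_padding_period_alt sequence
instance (sequence : List Int) (out : Option (List Int × List Int)) : Decidable (Spec_find_padding_period sequence out) := by unfold Spec_find_padding_period; infer_instance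

-- ===== CLAIM (what is proved, stated in full; the proofs are below) =====
def Claim_equal_find_padding_period : Prop := ∀ (sequence : List Int), Dom_find_padding_period sequence → Spec_find_padding_period sequence (find_padding_period sequence)

-- ===== LEMMAS AND PROOFS =====

-- specification of the DP table: longest common prefix length of two suffixes
def pvCpl : List Int → List Int → Nat
  | a :: as, b :: bs => if a = b then pvCpl as bs + 1 else 0
  | _, _ => 0

lemma pvCpl_nil_left (b : List Int) : pvCpl [] b = 0 := by cases b <;> rfl
lemma pvCpl_nil_right (a : List Int) : pvCpl a [] = 0 := by cases a <;> rfl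

lemma findSome?_congr_mem {α β : Type} {f g : α → Option β} :
    ∀ (l : List α), (∀ x ∈ l, f x = g x) → l.findSome? f = l.findSome? g := by
  intro l h
  induction l with
  | nil => rfl
  | cons a l ih =>
    simp only [List.findSome?_cons, h a (by simp)]
    cases g a with
    | none => exact ih (fun x hx => h x (by simp [hx]))
    | some b => rfl

lemma findSome?_eq_none_mem {α β : Type} {f : α → Option β}
    (l : List α) (h : ∀ x ∈ l, f x = none) : l.findSome? f = none := by
  induction l with
  | nil => rfl
  | cons a l ih =>
    simp only [List.findSome?_cons, h a (by simp)]
    exact ih (fun x hx => h x (by simp [hx]))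

lemma foldl_and_eq_all {α : Type} (f : α → Bool) :
    ∀ (l : List α) (acc : Bool), l.foldl (fun a x => a && f x) acc = (acc && l.all f) := by
  intro l
  induction l with
  | nil => intro acc; simp
  | cons a l ih => intro acc; simp [ih, Bool.and_assoc]

lemma findSome?_split {α : Type} (f g : Nat → Option α) (c N : Nat) (hcN : c ≤ N)
    (h1 : ∀ k < c, f k = g k) (h2 : ∀ k, c ≤ k → k < N → f k = none) :
    (List.range N).findSome? f = (List.range c).findSome? g := by
  rw [show List.range N = List.range c ++ (List.range (N - c)).map (fun t => c + t) from by
        rw [← List.range_add]; congr 1; omega]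
  have hnone : List.findSome? f ((List.range (N - c)).map (fun t => c + t)) = none := by
    apply findSome?_eq_none_mem
    intro x hx
    simp only [List.mem_map, List.mem_range] at hx
    obtain ⟨t, ht, rfl⟩ := hx
    exact h2 _ (by omega) (by omega)
  rw [List.findSome?_append, hnone, Option.or_none]
  exact findSome?_congr_mem _ (fun k hk => h1 k (List.mem_range.mp hk))

-- correctness of the DP rows: entry (d, j) of pvLcpRows seq k is pvCpl of the suffixes
lemma pvLcpRows_getD (seq : List Int) :
    ∀ k, k ≤ seq.length → ∀ d, d ≤ k → ∀ j, j ≤ seq.length →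
      ((pvLcpRows seq k).getD d []).getD j 0
        = pvCpl (seq.drop (seq.length - k + d)) (seq.drop j) := by
  intro k
  induction k with
  | zero =>
    intro _ d hd j hj
    interval_cases d
    simp only [pvLcpRows, List.getD_eq_getElem?_getD, List.getElem?_cons_zero,
      Option.getD_some, List.getElem?_replicate]
    rw [if_pos (by omega : j < seq.length + 1)]
    simp [List.drop_length, pvCpl_nil_left]
  | succ k ih =>
    intro hk d hd j hj
    cases d with
    | zero =>
      simp only [pvLcpRows, List.getD_eq_getElem?_getD, List.getElem?_cons_zero,
        Option.getD_some, pvLcpRow]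
      have hnext : (pvLcpRows seq k).headD [] = (pvLcpRows seq k)[0]?.getD [] := by
        cases h : pvLcpRows seq k with
        | nil => rfl
        | cons a l => rfl
      set i0 := seq.length - (k + 1) with hi0
      have hi0lt : i0 < seq.length := by omega
      rcases Nat.lt_or_ge j seq.length with hjlt | hjge
      · rw [List.getElem?_append_left (by simp [hjlt]), List.getElem?_map,
          List.getElem?_range hjlt]
        simp only [Option.map_some, Option.getD_some, Nat.add_zero]
        have hdi : seq.drop i0 = seq[i0] :: seq.drop (i0 + 1) :=
          List.drop_eq_getElem_cons hi0lt
        have hdj : seq.drop j = seq[j] :: seq.drop (j + 1) :=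
          List.drop_eq_getElem_cons hjlt
        rw [hdi, hdj]
        have hIH := ih (by omega) 0 (by omega) (j + 1) (by omega)
        simp only [List.getD_eq_getElem?_getD] at hIH
        rw [hnext, hIH, show seq.length - k + 0 = i0 + 1 by omega]
        rw [List.getElem?_eq_getElem hi0lt, List.getElem?_eq_getElem hjlt]
        simp [pvCpl]
      · have hj' : j = seq.length := by omega
        subst hj'
        rw [List.getElem?_append_right (by simp)]
        simp [List.drop_length, pvCpl_nil_right]
    | succ d' =>
      simp only [pvLcpRows, List.getD_cons_succ]
      rw [show seq.length - (k + 1) + (d' + 1) = seq.length - k + d' by omega]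
      exact ih (by omega) d' (by omega) j hj

-- pvCpl measures agreement of prefixes
lemma pvCpl_ge_iff : ∀ (t : Nat) (a b : List Int), t ≤ a.length → t ≤ b.length →
    (t ≤ pvCpl a b ↔ a.take t = b.take t) := by
  intro t
  induction t with
  | zero => intro a b _ _; simp
  | succ t ih =>
    intro a b ha hb
    cases a with
    | nil => simp at ha
    | cons x as =>
      cases b with
      | nil => simp at hb
      | cons y bs =>
        simp only [pvCpl, List.take_succ_cons, List.cons.injEq]
        by_cases hxy : x = y
        · rw [if_pos hxy]
          constructor
          · intro h
            exact ⟨hxy, (ih as bs (by simpa using ha) (by simpa using hb)).mp (by omega)⟩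
          · intro ⟨_, h⟩
            have := (ih as bs (by simpa using ha) (by simpa using hb)).mpr h
            omega
        · rw [if_neg hxy]
          constructor
          · intro h; omega
          · intro ⟨h, _⟩; exact absurd h hxy

-- block equality expressed pointwise
lemma blockeq_iff (s : List Int) (a L : Nat) :
    ((s.drop a).take L = s.take L) ↔ ∀ r < L, s[a + r]? = s[r]? := by
  constructor
  · intro h r hr
    have := congrArg (fun l => l[r]?) h
    simpa [List.getElem?_drop, hr] using this
  · intro h
    apply List.ext_getElem?
    intro r
    by_cases hr : r < L
    · simpa [List.getElem?_take, List.getElem?_drop, hr] using h r hr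
    · simp [hr]

-- shifted agreement on q*L - L positions ⇔ all q blocks equal block 0
lemma ptwise (s : List Int) (L q : Nat) (hL : 0 < L) :
    (∀ x < q * L - L, s[x + L]? = s[x]?)
      ↔ (∀ u < q, ∀ r < L, s[u * L + r]? = s[r]?) := by
  constructor
  · intro h u
    induction u with
    | zero => intro _ r hr; simp
    | succ u ihu =>
      intro hu r hr
      have ha : (u + 1) * L = u * L + L := Nat.succ_mul u L
      have hb : (q - 1) * L + L = q * L := by
        rw [← Nat.succ_mul]; congr 1; omega
      have hb2 : (q - 2) * L + L = (q - 1) * L := by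
        rw [← Nat.succ_mul]; congr 1; omega
      have hc : u * L ≤ (q - 2) * L := Nat.mul_le_mul_right L (by omega)
      have h1 : u * L + r < q * L - L := by omega
      have := h (u * L + r) h1
      rw [show u * L + r + L = (u + 1) * L + r by omega] at this
      rw [this]
      exact ihu (by omega) r hr
  · intro h x hx
    have hq2 : 2 ≤ q := by
      by_contra hc
      have hb : q * L ≤ 1 * L := Nat.mul_le_mul_right L (by omega)
      omega
    set u := x / L with hu
    set r := x % L with hr
    have hdm : L * u + r = x := Nat.div_add_mod x L
    have hrL : r < L := Nat.mod_lt _ hL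
    have hb : u * L = L * u := Nat.mul_comm u L
    have huq : u + 1 < q := by
      rcases Nat.lt_or_ge (u + 1) q with h' | h'
      · exact h'
      · exfalso
        have h1 : L * (q - 1) ≤ L * u := Nat.mul_le_mul_left L (by omega)
        have h2 : L * (q - 1) + L = L * q := by
          rw [← Nat.mul_succ]; congr 1; omega
        have h3 : q * L = L * q := Nat.mul_comm q L
        omega
    have ha : (u + 1) * L = u * L + L := Nat.succ_mul u L
    have e1 := h (u + 1) (by omega) r hrL
    have e2 := h u (by omega) r hrL
    rw [show x + L = (u + 1) * L + r by omega, e1, show x = u * L + r by omega, e2]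

theorem find_padding_period_spec : Claim_equal_find_padding_period := by
  intro seq _
  unfold Spec_find_padding_period
  simp only [find_padding_period, find_padding_period_alt, PySem.List.len_eq]
  have hOuter : PySem.List.pyRange 0 (seq.length : Int) 1
      = (List.range seq.length).map (fun k : Nat => (0 : Int) + (k : Int)) := by
    rw [PySem.List.pyRange_one, show ((seq.length : Int) - 0).toNat = seq.length by omega]
  rw [hOuter, List.findSome?_map]
  apply findSome?_congr_mem
  intro iN hiN'
  have hiN : iN < seq.length := List.mem_range.mp hiN'
  simp only [Function.comp, zero_add]
  set mN := seq.length - iN with hmN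
  have hcast_m : (seq.length : Int) - (iN : Int) = (mN : Int) := by omega
  have hslice_pad : PySem.List.slice seq (some 0) (some (iN : Int)) = seq.take iN := by
    simp [PySem.List.slice_to_natCast]
  have hslice_s : PySem.List.slice seq (some (iN : Int)) none = seq.drop iN :=
    PySem.List.slice_from_natCast seq iN
  have hlenpad : ((seq.take iN).length : Int) = (iN : Int) := by
    rw [List.length_take]; omega
  have hRA : PySem.List.pyRange ((iN : Int) + 1) ((seq.length : Int) + 1) 1
      = (List.range mN).map (fun k : Nat => (iN : Int) + 1 + (k : Int)) := by
    rw [PySem.List.pyRange_one,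
      show (((seq.length : Int) + 1) - ((iN : Int) + 1)).toNat = mN by omega]
  simp only [hslice_pad, hlenpad, hcast_m, hRA, List.findSome?_map]
  apply findSome?_split _ _ (mN / 2) mN (by omega)
  · -- agreeing region: k < mN/2, period length L = k+1
    intro k hk
    simp only [Function.comp]
    have hL2 : 2 * (k + 1) ≤ mN := by omega
    set s := seq.drop iN with hs
    have hsl : s.length = mN := by rw [hs, List.length_drop, hmN]
    set qN := mN / (k + 1) with hqN
    have hqm : qN * (k + 1) + mN % (k + 1) = mN := by
      rw [hqN]; exact Nat.div_add_mod' mN (k + 1)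
    have hq2 : 2 ≤ qN := by
      rw [hqN]; exact (Nat.le_div_iff_mul_le (Nat.succ_pos k)).mpr (by omega)
    have hcj : (iN : Int) + 1 + (k : Int) = ((iN + 1 + k : Nat) : Int) := by push_cast; ring
    have hsub : iN + 1 + k - iN = k + 1 := by omega
    simp only [hcj, PySem.List.slice_natCast, hsub, ← hs]
    have hplen : ((s.take (k + 1)).length : Int) = ((k + 1 : Nat) : Int) := by
      rw [List.length_take]; omega
    simp only [hplen]
    rw [if_pos (by omega : ((k + 1 : Nat) : Int) ≤ (mN : Int) - ((k + 1 : Nat) : Int))]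
    have hmodL : PySem.Int.mod ((mN : Nat) : Int) ((k + 1 : Nat) : Int)
        = ((mN % (k + 1) : Nat) : Int) := by
      exact_mod_cast PySem.Int.mod_natCast mN (k + 1)
    simp only [hmodL]
    have hlt : k + 1 < qN * (k + 1) := by
      have := Nat.mul_le_mul_right (k + 1) hq2; omega
    have hend : ((seq.length : Int) - ((mN % (k + 1) : Nat) : Int))
        = ((iN + qN * (k + 1) : Nat) : Int) := by
      have hNat : iN + qN * (k + 1) + mN % (k + 1) = seq.length := by omega
      rw [← hNat]; push_cast; ring
    have hre : PySem.List.pyRange ((iN + 1 + k : Nat) : Int)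
        ((seq.length : Int) - ((mN % (k + 1) : Nat) : Int)) ((k + 1 : Nat) : Int)
        = (List.range (qN - 1)).map (fun t => ((iN + (t + 1) * (k + 1) : Nat) : Int)) := by
      rw [hend, PySem.List.pyRange_of_pos _ _ (by positivity : (0 : Int) < ((k + 1 : Nat) : Int))]
      rw [if_pos (by exact_mod_cast (by omega : iN + 1 + k < iN + qN * (k + 1)) : ((iN + 1 + k : Nat) : Int) < ((iN + qN * (k + 1) : Nat) : Int))]
      rw [show (((iN + qN * (k + 1) : Nat) : Int) - ((iN + 1 + k : Nat) : Int)
            + ((k + 1 : Nat) : Int) - 1) = (((qN - 1) * (k + 1) + k : Nat) : Int) by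
          push_cast [Nat.cast_sub (by omega : 1 ≤ qN)]; ring]
      rw [← Int.natCast_div, Int.toNat_natCast,
        show (qN - 1) * (k + 1) + k = (k + 1) * (qN - 1) + k by ring,
        Nat.mul_add_div (Nat.succ_pos k), Nat.div_eq_of_lt (by omega), Nat.add_zero]
      apply List.map_congr_left
      intro t ht
      push_cast
      ring
    rw [hre, List.foldl_map, foldl_and_eq_all, Bool.true_and]
    have hdd : ∀ x : Nat, List.drop (iN + x) seq = s.drop x := by
      intro x; rw [hs, List.drop_drop]
    simp only [PySem.List.slice_natCast_add, hdd]
    -- B's table lookup equals the LCP of the two suffixes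
    have hT1 : qN * (k + 1) - (k + 1) ≤ s.length := by rw [hsl]; omega
    have hT2 : qN * (k + 1) - (k + 1) ≤ (s.drop (k + 1)).length := by
      rw [List.length_drop, hsl]; omega
    have hlook : ((pvLcpRows seq seq.length).getD iN []).getD (iN + (k + 1)) 0
        = pvCpl s (s.drop (k + 1)) := by
      rw [pvLcpRows_getD seq seq.length (le_refl _) iN (by omega) (iN + (k + 1)) (by omega)]
      rw [show seq.length - seq.length + iN = iN by omega, ← hs]
      congr 1
      rw [hs, List.drop_drop]
    have htake : (qN * (k + 1) - (k + 1)
          ≤ ((pvLcpRows seq seq.length).getD iN []).getD (iN + (k + 1)) 0)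
        ↔ (List.take (qN * (k + 1) - (k + 1)) (s.drop (k + 1))
            = List.take (qN * (k + 1) - (k + 1)) s) := by
      rw [hlook, pvCpl_ge_iff _ _ _ hT1 hT2]
      exact eq_comm
    have hpt : (List.take (qN * (k + 1) - (k + 1)) (s.drop (k + 1))
          = List.take (qN * (k + 1) - (k + 1)) s)
        ↔ ∀ u < qN, ∀ r < k + 1, s[u * (k + 1) + r]? = s[r]? := by
      rw [blockeq_iff, ← ptwise s (k + 1) qN (Nat.succ_pos k)]
      constructor
      · intro h x hx
        have := h x hx
        rwa [Nat.add_comm] at this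
      · intro h x hx
        have := h x hx
        rwa [Nat.add_comm x (k + 1)] at this
    have hblocks : (((List.range (qN - 1)).all
          (fun t => List.take (k + 1) (List.drop ((t + 1) * (k + 1)) s)
            == List.take (k + 1) s)) = true)
        ↔ ∀ u < qN, ∀ r < k + 1, s[u * (k + 1) + r]? = s[r]? := by
      simp only [List.all_eq_true, List.mem_range, beq_iff_eq]
      constructor
      · intro h u hu r hr
        cases u with
        | zero => simp
        | succ t => exact (blockeq_iff s ((t + 1) * (k + 1)) (k + 1)).mp (h t (by omega)) r hr
      · intro h t ht
        rw [blockeq_iff]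
        intro r hr
        exact h (t + 1) (by omega) r hr
    have hcond := hblocks.trans (hpt.symm.trans htake.symm)
    split_ifs with h1 h2 h2
    · rfl
    · exact absurd (hcond.mp h1) h2
    · exact absurd (hcond.mpr h2) h1
    · rfl
  · -- region where A's guard 2L ≤ m fails: A yields none
    intro k hk1 hk2
    simp only [Function.comp]
    have hcj : (iN : Int) + 1 + (k : Int) = ((iN + 1 + k : Nat) : Int) := by push_cast; ring
    have hsub : iN + 1 + k - iN = k + 1 := by omega
    have hplen : (((seq.drop iN).take (k + 1)).length : Int) = ((k + 1 : Nat) : Int) := by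
      rw [List.length_take, List.length_drop]; omega
    simp only [hcj, PySem.List.slice_natCast, hsub, hplen]
    rw [if_neg (by omega : ¬ ((k + 1 : Nat) : Int) ≤ (mN : Int) - ((k + 1 : Nat) : Int))]
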